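-- pv_equiv track=rewrite | github.com/ruizlo04/cosasLuismi2DAM | python/ejercicio5.py | obstaculos
-- ===== SOURCE A (Python) =====
-- def obstaculos(actions, track):
--     track = list(track)
--     for i, (action, segment) in enumerate(zip(actions, track)):
--         if action == "jump" and segment == "_":
--             track[i] = "x"
--         elif action == "run" and segment == "|":
--             track[i] = "/"
--     return "_" not in track and "|" not in track, ''.join(track)
-- ===== SOURCE B (Python) =====
-- def obstaculos(actions, track):
--     it = iter(actions)
--     cleared = True
--     out = []
--     for seg in track:
--         act = next(it, None)
--         if act == "jump" and seg == "_":
--             out.append("x")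
--         elif act == "run" and seg == "|":
--             out.append("/")
--         else:
--             out.append(seg)
--             if seg in ("_", "|"):
--                 cleared = False
--     return cleared, ''.join(out)
-- ===== Notes on version B (the rewrite author's own statement) =====
-- stated objective: simpler
-- what changed: Single pass that consumes actions as an iterator and builds the output while maintaining a cleared flag, instead of materialising the track, mutating it in place by index over enumerate(zip(...)), and then making two extra membership scans over the mutated list.
import Mathlib
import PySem

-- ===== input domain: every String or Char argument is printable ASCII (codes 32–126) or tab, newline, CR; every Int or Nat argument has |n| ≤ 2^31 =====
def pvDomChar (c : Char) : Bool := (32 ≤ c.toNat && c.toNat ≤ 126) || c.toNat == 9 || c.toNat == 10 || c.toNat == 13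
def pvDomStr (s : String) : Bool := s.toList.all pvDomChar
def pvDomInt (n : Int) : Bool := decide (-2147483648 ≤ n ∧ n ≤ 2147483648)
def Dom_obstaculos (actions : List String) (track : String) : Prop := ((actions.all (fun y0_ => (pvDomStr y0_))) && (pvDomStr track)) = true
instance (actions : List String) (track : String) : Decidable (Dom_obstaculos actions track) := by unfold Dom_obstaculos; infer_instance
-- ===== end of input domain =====

-- B is a single pass that consumes actions alongside track and maintains a cleared flag,
-- instead of A's index-based in-place mutation followed by two membership scans (objective: simpler).

-- ===== PORT A =====
-- the loop body: track[i] = "x" / "/" (enumerate gives a nonnegative Int index; pySetD is exact there)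
def obstaculosStep (t : List Char) (p : Int × String × Char) : List Char :=
  if p.2.1 = "jump" ∧ p.2.2 = '_' then PySem.List.pySetD t p.1 'x'
  else if p.2.1 = "run" ∧ p.2.2 = '|' then PySem.List.pySetD t p.1 '/'
  else t

def obstaculos (actions : List String) (track : String) : Bool × String :=
  let tl := track.toList
  let tl' := (PySem.List.enumerate (actions.zip tl)).foldl obstaculosStep tl
  (!(tl'.contains '_') && !(tl'.contains '|'), String.ofList tl')

-- ===== PORT B =====
-- fold over the track characters; state = (remaining actions iterator, cleared flag, output so far)
def obstaculosAltStep (st : List String × Bool × List Char) (c : Char) :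
    List String × Bool × List Char :=
  let (acts, cl, out) := st
  let (act, acts') : Option String × List String :=
    match acts with
    | [] => (none, [])
    | a :: t => (some a, t)
  if act = some "jump" ∧ c = '_' then (acts', cl, out ++ ['x'])
  else if act = some "run" ∧ c = '|' then (acts', cl, out ++ ['/'])
  else (acts', cl && !(c = '_' || c = '|'), out ++ [c])

def obstaculos_alt (actions : List String) (track : String) : Bool × String :=
  let st := track.toList.foldl obstaculosAltStep (actions, true, [])
  (st.2.1, String.ofList st.2.2)

-- ===== PRECONDITION & SPEC =====
def Spec_obstaculos (actions : List String) (track : String) (out : Bool × String) : Prop := out = obstaculos_alt actions track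
instance (actions : List String) (track : String) (out : Bool × String) : Decidable (Spec_obstaculos actions track out) := by unfold Spec_obstaculos; infer_instance

-- ===== CLAIM (what is proved, stated in full; the proofs are below) =====
def Claim_equal_obstaculos : Prop := ∀ (actions : List String) (track : String), Dom_obstaculos actions track → Spec_obstaculos actions track (obstaculos actions track)

-- ===== LEMMAS AND PROOFS =====

-- the transformed character list, as a pure zip-style recursion (proof-only spec)
def pvTrans : List String → List Char → List Char
  | _, [] => []
  | [], c :: cs => c :: pvTrans [] cs
  | a :: as, c :: cs =>
      (if a = "jump" ∧ c = '_' then 'x' else if a = "run" ∧ c = '|' then '/' else c)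
        :: pvTrans as cs

-- the cleared flag, as a pure recursion (proof-only spec)
def pvClr : List String → List Char → Bool
  | _, [] => true
  | [], c :: cs => !(c = '_' || c = '|') && pvClr [] cs
  | a :: as, c :: cs =>
      if a = "jump" ∧ c = '_' then pvClr as cs
      else if a = "run" ∧ c = '|' then pvClr as cs
      else !(c = '_' || c = '|') && pvClr as cs

theorem pvTrans_nil (cs : List Char) : pvTrans [] cs = cs := by
  induction cs with
  | nil => rfl
  | cons c cs ih => simp [pvTrans, ih]

theorem pvClr_nil_eq (cs : List Char) :
    pvClr [] cs = (!(cs.contains '_') && !(cs.contains '|')) := by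
  induction cs with
  | nil => rfl
  | cons c cs ih =>
      simp only [pvClr, ih, List.contains_cons]
      by_cases h1 : c = '_'
      · subst h1; simp
      · by_cases h2 : c = '|'
        · subst h2; simp
        · have b1 : ('_' == c) = false := by
            rw [beq_eq_false_iff_ne]; exact fun e => h1 e.symm
          have b2 : ('|' == c) = false := by
            rw [beq_eq_false_iff_ne]; exact fun e => h2 e.symm
          simp [b1, b2, h1, h2, Bool.and_assoc, Bool.and_comm]

theorem pvClr_eq (acts : List String) (cs : List Char) :
    pvClr acts cs = (!((pvTrans acts cs).contains '_') && !((pvTrans acts cs).contains '|')) := by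
  induction cs generalizing acts with
  | nil => cases acts <;> rfl
  | cons c cs ih =>
      cases acts with
      | nil =>
          rw [pvTrans_nil]
          rw [pvClr_nil_eq]
      | cons a as =>
          simp only [pvClr, pvTrans]
          by_cases hj : a = "jump" ∧ c = '_'
          · simp [hj, ih]
          · by_cases hr : a = "run" ∧ c = '|'
            · simp [hr, ih]
            · simp only [if_neg hj, if_neg hr, ih as, List.contains_cons]
              by_cases h1 : c = '_'
              · subst h1; simp
              · by_cases h2 : c = '|'
                · subst h2; simp
                · have b1 : ('_' == c) = false := by
                    rw [beq_eq_false_iff_ne]; exact fun e => h1 e.symm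
                  have b2 : ('|' == c) = false := by
                    rw [beq_eq_false_iff_ne]; exact fun e => h2 e.symm
                  simp [b1, b2, h1, h2, Bool.and_assoc, Bool.and_comm]

-- enumerate an already-zipped list from offset s (proof helper matching PySem.List.enumerate)
theorem foldl_step_shift (ps : List (String × Char)) :
    ∀ (n : Nat) (c : Char) (t : List Char),
      (PySem.List.enumerate ps ((n : Int) + 1)).foldl obstaculosStep (c :: t)
        = c :: (PySem.List.enumerate ps (n : Int)).foldl obstaculosStep t := by
  induction ps with
  | nil => intro n c t; simp [PySem.List.enumerate_nil]
  | cons p ps ih =>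
      intro n c t
      obtain ⟨a, s⟩ := p
      simp only [PySem.List.enumerate_cons, List.foldl_cons]
      have hset : ∀ v : Char,
          PySem.List.pySetD (c :: t) ((n : Int) + 1) v = c :: PySem.List.pySetD t (n : Int) v := by
        intro v
        have h1 : ((n : Int) + 1) = ((n + 1 : Nat) : Int) := by push_cast; ring
        rw [h1, PySem.List.pySetD_natCast, PySem.List.pySetD_natCast]
        simp [List.set]
      have harith : ((n : Int) + 1 + 1) = (((n + 1 : Nat) : Int) + 1) := by push_cast; ring
      by_cases hj : a = "jump" ∧ s = '_'
      · simp only [obstaculosStep, hj, and_self, if_pos, hset]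
        rw [harith, ih (n + 1)]
        push_cast; rfl
      · by_cases hr : a = "run" ∧ s = '|'
        · simp only [obstaculosStep]
          rw [if_neg hj, if_neg hj, if_pos hr, if_pos hr, hset]
          rw [harith, ih (n + 1)]
          push_cast; rfl
        · simp only [obstaculosStep]
          rw [if_neg hj, if_neg hj, if_neg hr, if_neg hr]
          rw [harith, ih (n + 1)]
          push_cast; rfl

theorem foldl_A_eq_pvTrans (cs : List Char) :
    ∀ acts : List String,
      (PySem.List.enumerate (acts.zip cs)).foldl obstaculosStep cs = pvTrans acts cs := by
  induction cs with
  | nil => intro acts; simp [pvTrans]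
  | cons c cs ih =>
      intro acts
      cases acts with
      | nil => simp [PySem.List.enumerate_nil, pvTrans_nil]
      | cons a as =>
          simp only [List.zip_cons_cons, PySem.List.enumerate_cons, List.foldl_cons, pvTrans]
          have h0 : ∀ v : Char,
              PySem.List.pySetD (c :: cs) (0 : Int) v = v :: cs := by
            intro v
            have : (0 : Int) = ((0 : Nat) : Int) := rfl
            rw [this, PySem.List.pySetD_natCast]; rfl
          have hshift := foldl_step_shift (as.zip cs) 0
          rw [show ((0 : Int) + 1) = ((0 : Nat) : Int) + 1 by norm_num] at *
          by_cases hj : a = "jump" ∧ c = '_'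
          · simp only [obstaculosStep, if_pos hj, h0, hshift]
            simp only [Nat.cast_zero]
            rw [show PySem.List.enumerate (as.zip cs) (0 : Int)
                  = PySem.List.enumerate (as.zip cs) from rfl, ih]
          · by_cases hr : a = "run" ∧ c = '|'
            · simp only [obstaculosStep, if_neg hj, if_pos hr, h0, hshift]
              simp only [Nat.cast_zero]
              rw [show PySem.List.enumerate (as.zip cs) (0 : Int)
                    = PySem.List.enumerate (as.zip cs) from rfl, ih]
            · simp only [obstaculosStep, if_neg hj, if_neg hr, hshift]
              simp only [Nat.cast_zero]
              rw [show PySem.List.enumerate (as.zip cs) (0 : Int)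
                    = PySem.List.enumerate (as.zip cs) from rfl, ih]

theorem foldl_B_eq (cs : List Char) :
    ∀ (acts : List String) (cl : Bool) (out : List Char),
      cs.foldl obstaculosAltStep (acts, cl, out)
        = (acts.drop cs.length, cl && pvClr acts cs, out ++ pvTrans acts cs) := by
  induction cs with
  | nil => intro acts cl out; cases acts <;> simp [pvTrans, pvClr]
  | cons c cs ih =>
      intro acts cl out
      cases acts with
      | nil =>
          simp only [List.foldl_cons, obstaculosAltStep, pvClr, pvTrans]
          have : ¬ ((none : Option String) = some "jump" ∧ c = '_') := by simp
          rw [if_neg this]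
          have : ¬ ((none : Option String) = some "run" ∧ c = '|') := by simp
          rw [if_neg this]
          rw [ih]
          simp [Bool.and_assoc]
      | cons a as =>
          simp only [List.foldl_cons, obstaculosAltStep, pvClr, pvTrans]
          by_cases hj : a = "jump" ∧ c = '_'
          · have h' : (some a = some "jump" ∧ c = '_') := by simp [hj.1, hj.2]
            rw [if_pos h', ih, if_pos hj, if_pos hj]
            simp
          · have h' : ¬ (some a = some "jump" ∧ c = '_') := by
              intro h; exact hj ⟨Option.some.inj h.1, h.2⟩
            rw [if_neg h']
            by_cases hr : a = "run" ∧ c = '|'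
            · have h'' : (some a = some "run" ∧ c = '|') := by simp [hr.1, hr.2]
              rw [if_pos h'', ih, if_neg hj, if_pos hr, if_neg hj, if_pos hr]
              simp
            · have h'' : ¬ (some a = some "run" ∧ c = '|') := by
                intro h; exact hr ⟨Option.some.inj h.1, h.2⟩
              rw [if_neg h'', ih, if_neg hj, if_neg hr, if_neg hj, if_neg hr]
              simp [Bool.and_comm, Bool.and_left_comm]

-- ===== VERDICT (by name: the statement is the Claim_ definition above) =====
theorem obstaculos_spec : Claim_equal_obstaculos := by
  intro actions track _
  simp only [Spec_obstaculos, obstaculos, obstaculos_alt, foldl_B_eq, foldl_A_eq_pvTrans]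
  simp [pvClr_eq]
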